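-- pv_equiv track=rewrite | github.com/ousidus/AI-Terminal-Assistant | chroma_rag.py | get_safety_level
-- ===== SOURCE A (Python) =====
-- def get_safety_level(command: str) -> int:
--     """Analyze command safety level with enhanced patterns"""
--     dangerous_patterns = {
--         5: ['rm -rf', 'mkfs', 'dd if=', 'format', 'fdisk', '>/dev/', 'sudo dd', 'wipefs'],
--         4: ['kill -9', 'pkill', 'killall', 'sudo rm', 'chmod 777', 'chown -R', 'sudo chmod'],
--         3: ['sudo', 'mv', 'cp -r', 'chown', 'chmod', 'mount', 'umount', 'systemctl'],
--         2: ['rm', 'rmdir', 'unzip', 'tar -x', 'git reset --hard', 'npm install -g']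
--     }
--
--     command_lower = command.lower()
--     for level, patterns in dangerous_patterns.items():
--         for pattern in patterns:
--             if pattern in command_lower:
--                 return level
--
--     return 1  # Safe by default
-- ===== SOURCE B (Python) =====
-- def get_safety_level(command: str) -> int:
--     """Analyze command safety level with enhanced patterns"""
--     dangerous_patterns = {
--         5: ['rm -rf', 'mkfs', 'dd if=', 'format', 'fdisk', '>/dev/', 'sudo dd', 'wipefs'],
--         4: ['kill -9', 'pkill', 'killall', 'sudo rm', 'chmod 777', 'chown -R', 'sudo chmod'],
--         3: ['sudo', 'mv', 'cp -r', 'chown', 'chmod', 'mount', 'umount', 'systemctl'],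
--         2: ['rm', 'rmdir', 'unzip', 'tar -x', 'git reset --hard', 'npm install -g']
--     }
--
--     command_lower = command.lower()
--     # Order-independent aggregate: collect every level whose pattern group
--     # matches, then take the maximum (default 1 when nothing matches).
--     matched = [level for level, patterns in dangerous_patterns.items()
--                if any(p in command_lower for p in patterns)]
--     return max(matched) if matched else 1
-- ===== Notes on version B (the rewrite author's own statement) =====
-- stated objective: alternative
-- what changed: Replaced the order-dependent first-match early-return scan by an order-independent aggregate: collect all matching levels and return their maximum (default 1), equivalent because A iterates levels in descending order.
import Mathlib
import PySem

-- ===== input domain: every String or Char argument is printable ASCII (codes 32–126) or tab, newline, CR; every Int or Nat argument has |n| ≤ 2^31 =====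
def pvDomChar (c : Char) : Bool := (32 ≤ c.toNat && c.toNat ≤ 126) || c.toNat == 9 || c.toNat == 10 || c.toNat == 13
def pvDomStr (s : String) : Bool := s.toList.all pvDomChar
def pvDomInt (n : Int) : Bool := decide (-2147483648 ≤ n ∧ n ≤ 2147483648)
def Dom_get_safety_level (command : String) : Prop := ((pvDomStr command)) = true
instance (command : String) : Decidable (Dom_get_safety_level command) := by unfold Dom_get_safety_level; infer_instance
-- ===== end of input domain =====

-- B replaces A's first-match early return by collecting all matching levels and taking their maximum (alternative decomposition, same cost).

-- ===== PORT A =====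
-- the dangerous_patterns dict (shared pattern table, insertion order 5,4,3,2)
def pvDangerousPatterns : List (Int × List String) :=
  [(5, ["rm -rf", "mkfs", "dd if=", "format", "fdisk", ">/dev/", "sudo dd", "wipefs"]),
   (4, ["kill -9", "pkill", "killall", "sudo rm", "chmod 777", "chown -R", "sudo chmod"]),
   (3, ["sudo", "mv", "cp -r", "chown", "chmod", "mount", "umount", "systemctl"]),
   (2, ["rm", "rmdir", "unzip", "tar -x", "git reset --hard", "npm install -g"])]

-- inner loop: 'for pattern in patterns: if pattern in command_lower: return level'
def pvScanPatterns (level : Int) (ps : List String) (cl : String) : Option Int :=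
  match ps with
  | [] => none
  | p :: rest => if PySem.Str.isIn p cl then some level else pvScanPatterns level rest cl

-- outer loop over dict items, early return on first match, default 1
def pvScanGroups (groups : List (Int × List String)) (cl : String) : Int :=
  match groups with
  | [] => 1
  | (lv, ps) :: rest =>
    match pvScanPatterns lv ps cl with
    | some r => r
    | none => pvScanGroups rest cl

def get_safety_level (command : String) : Int :=
  pvScanGroups pvDangerousPatterns (PySem.Str.lower command)

-- ===== PORT B =====
-- 'matched = [level for level, patterns in … if any(p in command_lower for p in patterns)]'
def pvMatchedLevels (groups : List (Int × List String)) (cl : String) : List Int :=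
  match groups with
  | [] => []
  | (lv, ps) :: rest =>
    if ps.any (fun p => PySem.Str.isIn p cl) then lv :: pvMatchedLevels rest cl
    else pvMatchedLevels rest cl

def get_safety_level_alt (command : String) : Int :=
  let cl := PySem.Str.lower command
  let matched := pvMatchedLevels pvDangerousPatterns cl
  match PySem.List.max? matched (fun x => x) with
  | some m => m
  | none => 1

-- ===== PRECONDITION & SPEC =====
def Spec_get_safety_level (command : String) (out : Int) : Prop := out = get_safety_level_alt command
instance (command : String) (out : Int) : Decidable (Spec_get_safety_level command out) := by unfold Spec_get_safety_level; infer_instance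

-- ===== CLAIM (what is proved, stated in full; the proofs are below) =====
def Claim_equal_get_safety_level : Prop := ∀ (command : String), Dom_get_safety_level command → Spec_get_safety_level command (get_safety_level command)

-- ===== LEMMAS AND PROOFS =====
theorem pvScanPatterns_eq (level : Int) (ps : List String) (cl : String) :
    pvScanPatterns level ps cl = if ps.any (fun p => PySem.Str.isIn p cl) then some level else none := by
  induction ps with
  | nil => simp [pvScanPatterns]
  | cons p rest ih =>
    by_cases h : PySem.Chars.isIn p.toList cl.toList = true <;> simp [pvScanPatterns, ih, h]

theorem get_safety_level_eq_alt (command : String) :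
    get_safety_level command = get_safety_level_alt command := by
  unfold get_safety_level get_safety_level_alt pvDangerousPatterns
  simp only [pvScanGroups, pvMatchedLevels, pvScanPatterns_eq]
  set cl := PySem.Str.lower command
  by_cases h5 : (["rm -rf", "mkfs", "dd if=", "format", "fdisk", ">/dev/", "sudo dd", "wipefs"]).any (fun p => PySem.Str.isIn p cl) = true <;>
  by_cases h4 : (["kill -9", "pkill", "killall", "sudo rm", "chmod 777", "chown -R", "sudo chmod"]).any (fun p => PySem.Str.isIn p cl) = true <;>
  by_cases h3 : (["sudo", "mv", "cp -r", "chown", "chmod", "mount", "umount", "systemctl"]).any (fun p => PySem.Str.isIn p cl) = true <;>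
  by_cases h2 : (["rm", "rmdir", "unzip", "tar -x", "git reset --hard", "npm install -g"]).any (fun p => PySem.Str.isIn p cl) = true <;>
  simp_all [PySem.List.max?]

-- ===== VERDICT (by name: the statement is the Claim_ definition above) =====
theorem get_safety_level_spec : Claim_equal_get_safety_level := by
  intro command _
  exact get_safety_level_eq_alt command
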